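-- pv_equiv track=rewrite | github.com/andrey-yemelyanov/competitive-programming | cp-book/ch1/adhoc/game/easier/947_MasterMindHelper.py | n_digits_in_common
-- ===== SOURCE A (Python) =====
-- def n_digits_in_common(secret_code, guess):
--     guess_dict = {}
--     for digit in guess:
--         if digit not in guess_dict:
--             guess_dict[digit] = 1
--         else:
--             guess_dict[digit] += 1
--     n = 0
--     for digit in secret_code:
--         if digit in guess_dict:
--             n += 1
--             if guess_dict[digit] == 1:
--                 del guess_dict[digit]
--             else:
--                 guess_dict[digit] -= 1
--     return n
-- ===== SOURCE B (Python) =====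
-- def n_digits_in_common(secret_code, guess):
--     # Build a frequency table for each code, then sum the element-wise
--     # minimum of the two histograms (multiset intersection size).
--     secret_counts = {}
--     for ch in secret_code:
--         secret_counts[ch] = secret_counts.get(ch, 0) + 1
--     guess_counts = {}
--     for ch in guess:
--         guess_counts[ch] = guess_counts.get(ch, 0) + 1
--     return sum(min(v, guess_counts.get(ch, 0)) for ch, v in secret_counts.items())
-- ===== Notes on version B (the rewrite author's own statement) =====
-- stated objective: idiomatic
-- what changed: Instead of building one mutable dict of guess counts and consuming it (decrement/delete) while scanning the secret, B builds two frequency tables and sums the element-wise minimum of the histograms over the secret's distinct digits.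
import Mathlib
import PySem

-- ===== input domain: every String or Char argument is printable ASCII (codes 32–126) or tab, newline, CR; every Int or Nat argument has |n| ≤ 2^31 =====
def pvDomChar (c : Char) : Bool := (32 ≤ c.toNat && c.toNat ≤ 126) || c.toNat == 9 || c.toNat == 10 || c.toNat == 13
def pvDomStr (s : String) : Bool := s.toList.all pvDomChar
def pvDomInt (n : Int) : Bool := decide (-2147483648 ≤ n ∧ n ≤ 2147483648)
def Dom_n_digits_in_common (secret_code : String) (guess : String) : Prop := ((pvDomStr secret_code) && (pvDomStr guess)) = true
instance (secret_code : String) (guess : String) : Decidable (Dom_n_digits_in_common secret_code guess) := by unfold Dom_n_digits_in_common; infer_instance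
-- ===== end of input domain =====

-- B replaces A's build-one-dict-then-consume-it scan by two frequency tables whose
-- element-wise minimum is summed (multiset intersection); same cost, more idiomatic.


-- ===== PORT A =====
def n_digits_in_common (secret_code : String) (guess : String) : Int :=
  let guess_dict := guess.toList.foldl
    (fun d digit =>
      if d.contains digit = false then d.insert digit 1
      else d.insert digit (d.getD digit 0 + 1))
    PySem.Dict.empty
  let st := secret_code.toList.foldl
    (fun (st : Int × PySem.Dict Char Int) digit =>
      if st.2.contains digit then
        (st.1 + 1,
         if st.2.getD digit 0 = 1 then st.2.erase digit
         else st.2.insert digit (st.2.getD digit 0 - 1))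
      else st)
    (0, guess_dict)
  st.1

-- ===== PORT B =====
def n_digits_in_common_alt (secret_code : String) (guess : String) : Int :=
  let secret_counts := secret_code.toList.foldl
    (fun d ch => d.insert ch (d.getD ch 0 + 1)) PySem.Dict.empty
  let guess_counts := guess.toList.foldl
    (fun d ch => d.insert ch (d.getD ch 0 + 1)) PySem.Dict.empty
  secret_counts.items.foldl
    (fun acc p => acc + min p.2 (guess_counts.getD p.1 0)) 0

-- ===== PRECONDITION & SPEC =====
def Spec_n_digits_in_common (secret_code : String) (guess : String) (out : Int) : Prop := out = n_digits_in_common_alt secret_code guess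
instance (secret_code : String) (guess : String) (out : Int) : Decidable (Spec_n_digits_in_common secret_code guess out) := by unfold Spec_n_digits_in_common; infer_instance

-- ===== CLAIM (what is proved, stated in full; the proofs are below) =====
def Claim_equal_n_digits_in_common : Prop := ∀ (secret_code : String) (guess : String), Dom_n_digits_in_common secret_code guess → Spec_n_digits_in_common secret_code guess (n_digits_in_common secret_code guess)

-- ===== LEMMAS AND PROOFS =====

-- abstract form of A's consuming loop: m is the remaining multiset of guess digits
def pvFa : List Char → (Char → Nat) → Nat
  | [], _ => 0
  | c :: rest, m =>
      if m c = 0 then pvFa rest m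
      else pvFa rest (fun x => if x = c then m x - 1 else m x) + 1

lemma pv_get?_erase (d : PySem.Dict Char Int) (k k' : Char) :
    (d.erase k).get? k' = if k' = k then none else d.get? k' := by
  rcases d with ⟨items⟩
  simp only [PySem.Dict.erase, PySem.Dict.get?, List.find?_filter]
  by_cases hk : k' = k
  · subst hk
    simp [List.find?_eq_none]
  · rw [if_neg hk]
    congr 1
    induction items with
    | nil => rfl
    | cons p rest ih =>
        by_cases hp : p.1 = k'
        · simp [hp, hk]
        · simp only [List.find?_cons]
          have h1 : (decide ((!p.1 == k) = true ∧ (p.1 == k') = true)) = false := by simp [hp]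
          have h2 : (p.1 == k') = false := by simp [hp]
          rw [h1, h2]
          exact ih

lemma pv_getD_erase (d : PySem.Dict Char Int) (k k' : Char) :
    (d.erase k).getD k' 0 = if k' = k then 0 else d.getD k' 0 := by
  rw [PySem.Dict.getD_eq_get?_getD, pv_get?_erase]
  by_cases h : k' = k <;> simp [h, PySem.Dict.getD_eq_get?_getD]

lemma pv_contains_erase (d : PySem.Dict Char Int) (k k' : Char) :
    (d.erase k).contains k' = if k' = k then false else d.contains k' := by
  rw [PySem.Dict.contains_eq_isSome_get?, pv_get?_erase]
  by_cases h : k' = k <;> simp [h, PySem.Dict.contains_eq_isSome_get?]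

-- A's dict-building loop is the counting loop: on an absent key getD gives 0
lemma pv_buildA_eq (l : List Char) : ∀ d : PySem.Dict Char Int,
    l.foldl (fun d digit =>
      if d.contains digit = false then d.insert digit 1
      else d.insert digit (d.getD digit 0 + 1)) d
    = l.foldl (fun d x => d.insert x (d.getD x 0 + 1)) d := by
  induction l with
  | nil => intro d; rfl
  | cons c rest ih =>
      intro d
      simp only [List.foldl]
      have hstep : (if d.contains c = false then d.insert c 1
          else d.insert c (d.getD c 0 + 1)) = d.insert c (d.getD c 0 + 1) := by
        by_cases h : d.contains c
        · simp [h]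
        · have h' : d.contains c = false := by simpa using h
          simp [h', PySem.Dict.getD_of_not_contains d 0 h']
      rw [hstep, ih]

-- A's consuming loop computes pvFa whenever d represents the multiset m
lemma pv_loopA (s : List Char) : ∀ (m : Char → Nat) (d : PySem.Dict Char Int) (n : Int),
    (∀ c, d.getD c 0 = (m c : Int)) → (∀ c, d.contains c = true ↔ m c ≠ 0) →
    (s.foldl
      (fun (st : Int × PySem.Dict Char Int) digit =>
        if st.2.contains digit then
          (st.1 + 1,
           if st.2.getD digit 0 = 1 then st.2.erase digit
           else st.2.insert digit (st.2.getD digit 0 - 1))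
        else st)
      (n, d)).1 = n + (pvFa s m : Int) := by
  induction s with
  | nil => intro m d n _ _; simp [pvFa]
  | cons c rest ih =>
      intro m d n h1 h2
      simp only [List.foldl]
      by_cases hm : m c = 0
      · have hc : d.contains c = false := by
          have := h2 c; simp [hm] at this; exact this
        simp only [hc, Bool.false_eq_true, if_false]
        rw [ih m d n h1 h2, pvFa, if_pos hm]
      · have hc : d.contains c = true := (h2 c).mpr hm
        have hge : 1 ≤ m c := Nat.one_le_iff_ne_zero.mpr hm
        simp only [hc, if_true]
        by_cases h1c : m c = 1
        · have hg : d.getD c 0 = 1 := by rw [h1 c, h1c]; rfl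
          rw [if_pos hg]
          have hrec := ih (fun x => if x = c then m x - 1 else m x) (d.erase c) (n + 1)
            (by
              intro c'
              rw [pv_getD_erase]
              by_cases h : c' = c
              · simp [h, h1c]
              · simp [h, h1 c'])
            (by
              intro c'
              rw [pv_contains_erase]
              by_cases h : c' = c
              · simp [h, h1c]
              · simpa [h] using h2 c')
          rw [hrec, pvFa, if_neg hm]
          push_cast
          ring
        · have hg : d.getD c 0 ≠ 1 := by
            rw [h1 c]; exact_mod_cast h1c
          rw [if_neg hg]
          have hrec := ih (fun x => if x = c then m x - 1 else m x)
            (d.insert c (d.getD c 0 - 1)) (n + 1)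
            (by
              intro c'
              rw [PySem.Dict.getD_insert]
              by_cases h : c' = c
              · simp only [h, h1 c]
                push_cast
                omega
              · simp [h, h1 c'])
            (by
              intro c'
              rw [PySem.Dict.contains_insert]
              by_cases h : c' = c
              · simp only [h, BEq.rfl, Bool.true_or, true_iff]
                simp
                omega
              · simpa [h] using h2 c')
          rw [hrec, pvFa, if_neg hm]
          push_cast
          ring

-- sum over an inserted finset, isolating the inserted element
lemma pv_sum_insert_split (t : Finset Char) (c : Char) (f : Char → Nat) :
    ∑ x ∈ insert c t, f x = f c + ∑ x ∈ t.erase c, f x := by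
  rw [← Finset.add_sum_erase _ f (Finset.mem_insert_self c t),
      Finset.erase_insert_eq_erase]

lemma pv_sum_split (t : Finset Char) (c : Char) (f : Char → Nat) :
    ∑ x ∈ t, f x = (if c ∈ t then f c else 0) + ∑ x ∈ t.erase c, f x := by
  by_cases h : c ∈ t
  · rw [if_pos h, Finset.add_sum_erase t f h]
  · rw [if_neg h, Finset.erase_eq_of_notMem h, Nat.zero_add]

-- pvFa is the sum of element-wise minima of the two histograms
lemma pv_pvFa_eq (s : List Char) : ∀ m : Char → Nat,
    pvFa s m = ∑ c ∈ s.toFinset, min (s.count c) (m c) := by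
  induction s with
  | nil => intro m; simp [pvFa]
  | cons c rest ih =>
      intro m
      rw [List.toFinset_cons, pv_sum_insert_split]
      have hterm : ∀ x ∈ rest.toFinset.erase c,
          min ((c :: rest).count x) (m x) = min (rest.count x) (m x) := by
        intro x hx
        rw [List.count_cons_of_ne (Finset.ne_of_mem_erase hx).symm]
      rw [Finset.sum_congr rfl hterm]
      have hcnt : (c :: rest).count c = rest.count c + 1 := by simp
      by_cases hm : m c = 0
      · rw [pvFa, if_pos hm, ih m, pv_sum_split rest.toFinset c]
        have hz : min ((c :: rest).count c) (m c) = 0 := by simp [hm]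
        rw [hz]
        by_cases h : c ∈ rest.toFinset
        · rw [if_pos h]; simp [hm]
        · rw [if_neg h]
      · rw [pvFa, if_neg hm, ih, pv_sum_split rest.toFinset c]
        have herase : ∀ x ∈ rest.toFinset.erase c,
            min (rest.count x) (if x = c then m x - 1 else m x)
              = min (rest.count x) (m x) := by
          intro x hx
          rw [if_neg (Finset.ne_of_mem_erase hx)]
        rw [Finset.sum_congr rfl herase]
        by_cases h : c ∈ rest.toFinset
        · rw [if_pos h, if_pos rfl, hcnt]
          omega
        · have h0 : rest.count c = 0 := by
            rw [List.count_eq_zero]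
            simpa [List.mem_toFinset] using h
          rw [if_neg h, hcnt, h0]
          omega

-- B computes exactly that sum of minima
lemma pv_alt_eq (secret_code guess : String) :
    n_digits_in_common_alt secret_code guess
      = ((∑ c ∈ secret_code.toList.toFinset,
          min (secret_code.toList.count c) (guess.toList.count c) : Nat) : Int) := by
  unfold n_digits_in_common_alt
  simp only [PySem.Dict.foldl_insert_getD_add_one_eq_counter, PySem.Dict.items_counter]
  rw [PySem.List.foldl_add]
  simp only [PySem.Dict.getD_counter, List.map_map]
  have hmap : ∀ p : Char,
      ((fun p : Char × Int => min p.2 ((guess.toList.count p.1 : Int))) ∘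
        fun k => (k, (secret_code.toList.count k : Int))) p
      = ((min (secret_code.toList.count p) (guess.toList.count p) : Nat) : Int) := by
    intro p
    simp [Function.comp, Nat.cast_min]
  rw [List.map_congr_left (fun p _ => hmap p)]
  rw [← List.sum_toFinset _ (PySem.Set.nodup_ofList secret_code.toList)]
  have hfs : (PySem.Set.ofList secret_code.toList).toFinset = secret_code.toList.toFinset := by
    apply Finset.ext
    intro a
    simp [List.mem_toFinset, PySem.Set.mem_ofList]
  rw [hfs]
  rw [Nat.cast_sum]
  simp

-- ===== VERDICT (by name: the statement is the Claim_ definition above) =====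
theorem n_digits_in_common_spec : Claim_equal_n_digits_in_common := by
  intro secret_code guess _
  unfold Spec_n_digits_in_common
  unfold n_digits_in_common
  rw [pv_buildA_eq, PySem.Dict.foldl_insert_getD_add_one_eq_counter]
  rw [pv_loopA secret_code.toList (fun c => guess.toList.count c)
    (PySem.Dict.counter guess.toList) 0
    (fun c => PySem.Dict.getD_counter guess.toList c)
    (by
      intro c
      rw [PySem.Dict.contains_counter]
      simp [List.count_eq_zero])]
  rw [pv_alt_eq, pv_pvFa_eq]
  simp
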